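-- pv_equiv track=rewrite | github.com/Zugwang/PrepaGithub | TD7/recherche_dans_une_chaine.py | occurence_avec_moins_erreurs
-- ===== SOURCE A (Python) =====
-- def est_une_occurence_avec_k_erreurs(chaine,mot,i,k):
--     erreur = 0
--     for j in range(len(mot)):
--         if mot[j] != chaine[i+j]:
--             erreur += 1
--         if erreur > k:
--             return False
--     return True
--
-- def premiere_occurence_k_erreur(chaine,mot,k):
--     for i in range(len(chaine) - len(mot)+1):
--         if est_une_occurence_avec_k_erreurs(chaine,mot,i,k):
--             return i
--     return None
--
-- def occurence_avec_moins_erreurs(chaine,mot):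
--     nbre_k_erreur = 0
--     reponse = -1
--     while nbre_k_erreur < len(mot):
--         reponse = premiere_occurence_k_erreur(chaine,mot,nbre_k_erreur)
--         if reponse != None:
--             return reponse
--         nbre_k_erreur += 1
--     return None
-- ===== SOURCE B (Python) =====
-- def occurence_avec_moins_erreurs(chaine, mot):
--     m = len(mot)
--     best_i, best_e = None, m
--     for i in range(len(chaine) - m + 1):
--         e = sum(1 for j in range(m) if mot[j] != chaine[i + j])
--         if e < best_e:
--             best_i, best_e = i, e
--     return best_i
-- ===== Notes on version B (the rewrite author's own statement) =====
-- stated objective: faster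
-- what changed: Replaced the outer loop over error thresholds k=0..m-1 (each rescanning all positions with an early-exit matcher) by a single pass over positions that counts mismatches once per position and tracks the leftmost strict minimum.
import Mathlib
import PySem

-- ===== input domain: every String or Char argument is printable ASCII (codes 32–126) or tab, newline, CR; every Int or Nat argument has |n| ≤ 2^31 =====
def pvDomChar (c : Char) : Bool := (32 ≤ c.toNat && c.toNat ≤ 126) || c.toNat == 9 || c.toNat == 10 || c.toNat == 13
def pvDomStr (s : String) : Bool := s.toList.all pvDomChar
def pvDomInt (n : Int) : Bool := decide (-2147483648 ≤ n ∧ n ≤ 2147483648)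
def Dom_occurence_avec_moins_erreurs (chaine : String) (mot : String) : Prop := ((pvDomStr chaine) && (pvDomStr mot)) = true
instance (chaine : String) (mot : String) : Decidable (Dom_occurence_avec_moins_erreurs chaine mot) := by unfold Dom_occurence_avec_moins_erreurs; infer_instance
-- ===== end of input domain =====

-- B replaces A's loop over error thresholds k (each rescanning all positions) by a single
-- pass over positions tracking the leftmost minimum mismatch count (objective: faster).

-- ===== PORT A =====
-- inner loop of est_une_occurence_avec_k_erreurs: for j in range(len(mot)) with accumulator erreur
def pvEstGo (chaine mot : String) (i k : Int) : List Int → Int → Bool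
  | [], _ => true
  | j :: js, erreur =>
    let erreur := if PySem.List.pyGet? mot.toList j ≠ PySem.List.pyGet? chaine.toList (i + j)
                  then erreur + 1 else erreur
    if erreur > k then false else pvEstGo chaine mot i k js erreur

def est_une_occurence_avec_k_erreurs (chaine mot : String) (i k : Int) : Bool :=
  pvEstGo chaine mot i k (PySem.List.pyRange 0 (mot.toList.length : Int) 1) 0

-- for i in range(len(chaine) - len(mot) + 1): first i accepted, else None
def pvPremGo (chaine mot : String) (k : Int) : List Int → Option Int
  | [] => none
  | i :: is =>
    if est_une_occurence_avec_k_erreurs chaine mot i k then some i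
    else pvPremGo chaine mot k is

def premiere_occurence_k_erreur (chaine mot : String) (k : Int) : Option Int :=
  pvPremGo chaine mot k
    (PySem.List.pyRange 0 ((chaine.toList.length : Int) - (mot.toList.length : Int) + 1) 1)

-- while nbre_k_erreur < len(mot): k = 0,1,2,…
def pvKGo (chaine mot : String) : List Int → Option Int
  | [] => none
  | k :: ks =>
    match premiere_occurence_k_erreur chaine mot k with
    | some r => some r
    | none => pvKGo chaine mot ks

def occurence_avec_moins_erreurs (chaine : String) (mot : String) : Option Int :=
  pvKGo chaine mot (PySem.List.pyRange 0 (mot.toList.length : Int) 1)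

-- ===== PORT B =====
-- e = sum(1 for j in range(m) if mot[j] != chaine[i+j])
def pvErrB (chaine mot : String) (m i : Int) : Int :=
  ((PySem.List.pyRange 0 m 1).countP
    (fun j => decide (PySem.List.pyGet? mot.toList j ≠ PySem.List.pyGet? chaine.toList (i + j))) : Int)

-- single pass over positions, state (best_i, best_e)
def pvBGo (chaine mot : String) (m : Int) : List Int → Option Int × Int → Option Int × Int
  | [], st => st
  | i :: is, (bi, be) =>
    let e := pvErrB chaine mot m i
    pvBGo chaine mot m is (if e < be then (some i, e) else (bi, be))

def occurence_avec_moins_erreurs_alt (chaine : String) (mot : String) : Option Int :=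
  let m : Int := mot.toList.length
  (pvBGo chaine mot m
    (PySem.List.pyRange 0 ((chaine.toList.length : Int) - m + 1) 1) (none, m)).1

-- ===== PRECONDITION & SPEC =====
def Spec_occurence_avec_moins_erreurs (chaine : String) (mot : String) (out : Option Int) : Prop := out = occurence_avec_moins_erreurs_alt chaine mot
instance (chaine : String) (mot : String) (out : Option Int) : Decidable (Spec_occurence_avec_moins_erreurs chaine mot out) := by unfold Spec_occurence_avec_moins_erreurs; infer_instance

-- ===== CLAIM (what is proved, stated in full; the proofs are below) =====
def Claim_equal_occurence_avec_moins_erreurs : Prop := ∀ (chaine : String) (mot : String), Dom_occurence_avec_moins_erreurs chaine mot → Spec_occurence_avec_moins_erreurs chaine mot (occurence_avec_moins_erreurs chaine mot)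

-- ===== LEMMAS AND PROOFS =====

-- running minimum of pvErrB over a list of positions, started at a
def pvMinE (chaine mot : String) (m : Int) (l : List Int) (a : Int) : Int :=
  l.foldl (fun acc i => min acc (pvErrB chaine mot m i)) a

theorem pvMinE_nil (chaine mot : String) (m a : Int) : pvMinE chaine mot m [] a = a := rfl

theorem pvMinE_cons (chaine mot : String) (m a i : Int) (l : List Int) :
    pvMinE chaine mot m (i :: l) a = pvMinE chaine mot m l (min a (pvErrB chaine mot m i)) := rfl

theorem pvMinE_le_init (chaine mot : String) (m : Int) (l : List Int) (a : Int) :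
    pvMinE chaine mot m l a ≤ a := by
  induction l generalizing a with
  | nil => simp [pvMinE_nil]
  | cons i l ih =>
    rw [pvMinE_cons]
    exact le_trans (ih _) (min_le_left _ _)

theorem pvMinE_le_mem (chaine mot : String) (m : Int) (l : List Int) (a i : Int)
    (h : i ∈ l) : pvMinE chaine mot m l a ≤ pvErrB chaine mot m i := by
  induction l generalizing a with
  | nil => cases h
  | cons j l ih =>
    rw [pvMinE_cons]
    rcases List.mem_cons.mp h with h | h
    · subst h
      exact le_trans (pvMinE_le_init _ _ _ _ _) (min_le_right _ _)
    · exact ih _ h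

theorem pvMinE_attained (chaine mot : String) (m : Int) (l : List Int) (a : Int) :
    pvMinE chaine mot m l a = a ∨ ∃ i ∈ l, pvErrB chaine mot m i = pvMinE chaine mot m l a := by
  induction l generalizing a with
  | nil => left; rfl
  | cons j l ih =>
    rw [pvMinE_cons]
    rcases ih (min a (pvErrB chaine mot m j)) with h | ⟨i, hi, he⟩
    · rcases min_cases a (pvErrB chaine mot m j) with ⟨hm, _⟩ | ⟨hm, _⟩
      · left; rw [h, hm]
      · right; exact ⟨j, List.mem_cons_self, by rw [h, hm]⟩
    · right; exact ⟨i, List.mem_cons_of_mem _ hi, he⟩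

theorem pvErrB_nonneg (chaine mot : String) (m i : Int) : 0 ≤ pvErrB chaine mot m i := by
  unfold pvErrB; positivity

theorem pvMinE_nonneg (chaine mot : String) (m : Int) (l : List Int) (a : Int) (ha : 0 ≤ a) :
    0 ≤ pvMinE chaine mot m l a := by
  induction l generalizing a with
  | nil => exact ha
  | cons i l ih =>
    rw [pvMinE_cons]
    exact ih _ (le_min ha (pvErrB_nonneg _ _ _ _))

-- find? respects pointwise-equal predicates (no Mathlib name found for this)
theorem pvFind?_congr (l : List Int) (p q : Int → Bool) (h : ∀ x ∈ l, p x = q x) :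
    l.find? p = l.find? q := by
  induction l with
  | nil => rfl
  | cons x l ih =>
    rw [List.find?_cons, List.find?_cons, h x List.mem_cons_self,
      ih (fun y hy => h y (List.mem_cons_of_mem _ hy))]

-- A's inner loop computes: accumulated count stays ≤ k (needs 0 ≤ entry accumulator slack)
theorem pvEstGo_eq (chaine mot : String) (i k : Int) (js : List Int) (acc : Int)
    (hacc : acc ≤ k) :
    pvEstGo chaine mot i k js acc =
      decide (acc + ((js.countP
        (fun j => decide (PySem.List.pyGet? mot.toList j ≠ PySem.List.pyGet? chaine.toList (i + j)))) : Int) ≤ k) := by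
  induction js generalizing acc with
  | nil => simp [pvEstGo]; exact hacc
  | cons j js ih =>
    rw [pvEstGo]
    simp only [List.countP_cons]
    by_cases hj : PySem.List.pyGet? mot.toList j ≠ PySem.List.pyGet? chaine.toList (i + j)
    · rw [if_pos hj]
      have hp : (decide (PySem.List.pyGet? mot.toList j ≠ PySem.List.pyGet? chaine.toList (i + j))) = true := by
        simp [hj]
      rw [hp, if_pos rfl]
      by_cases hk : acc + 1 > k
      · rw [if_pos hk]
        have h0 : (0 : Int) ≤ ((js.countP
          (fun j => decide (PySem.List.pyGet? mot.toList j ≠ PySem.List.pyGet? chaine.toList (i + j)))) : Int) := by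
          positivity
        symm
        rw [decide_eq_false_iff_not]
        push_cast
        omega
      · rw [if_neg hk, ih (acc + 1) (by omega)]
        rw [decide_eq_decide]
        push_cast
        omega
    · rw [if_neg hj]
      have hp : (decide (PySem.List.pyGet? mot.toList j ≠ PySem.List.pyGet? chaine.toList (i + j))) = false := by
        simpa using hj
      rw [hp, if_neg (by simp : ¬ (false = true)), add_zero]
      have hkf : ¬ acc > k := by omega
      rw [if_neg hkf, ih acc hacc]

theorem pvEst_eq (chaine mot : String) (i k : Int) (hk : 0 ≤ k) :
    est_une_occurence_avec_k_erreurs chaine mot i k =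
      decide (pvErrB chaine mot (mot.toList.length : Int) i ≤ k) := by
  rw [est_une_occurence_avec_k_erreurs, pvEstGo_eq chaine mot i k _ 0 hk]
  simp [pvErrB]

theorem pvPremGo_eq (chaine mot : String) (k : Int) (hk : 0 ≤ k) (l : List Int) :
    pvPremGo chaine mot k l =
      l.find? (fun i => decide (pvErrB chaine mot (mot.toList.length : Int) i ≤ k)) := by
  induction l with
  | nil => rfl
  | cons i l ih =>
    rw [pvPremGo, pvEst_eq chaine mot i k hk, List.find?_cons, ih]
    cases hd : decide (pvErrB chaine mot (mot.toList.length : Int) i ≤ k) <;> simp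

-- B's fold: final state is (leftmost strict-min index, running minimum)
theorem pvBGo_eq (chaine mot : String) (m : Int) (l : List Int) (bi : Option Int) (be : Int) :
    pvBGo chaine mot m l (bi, be) =
      ((if pvMinE chaine mot m l be < be
        then l.find? (fun i => pvErrB chaine mot m i == pvMinE chaine mot m l be)
        else bi), pvMinE chaine mot m l be) := by
  induction l generalizing bi be with
  | nil =>
    rw [pvMinE_nil, if_neg (lt_irrefl be)]
    rfl
  | cons i l ih =>
    show pvBGo chaine mot m l
        (if pvErrB chaine mot m i < be then (some i, pvErrB chaine mot m i) else (bi, be)) = _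
    by_cases hi : pvErrB chaine mot m i < be
    · rw [if_pos hi, ih, pvMinE_cons, min_eq_right (le_of_lt hi)]
      have hle : pvMinE chaine mot m l (pvErrB chaine mot m i) ≤ pvErrB chaine mot m i :=
        pvMinE_le_init _ _ _ _ _
      by_cases hlt : pvMinE chaine mot m l (pvErrB chaine mot m i) < pvErrB chaine mot m i
      · rw [if_pos hlt, if_pos (lt_trans hlt hi), List.find?_cons]
        have : (pvErrB chaine mot m i == pvMinE chaine mot m l (pvErrB chaine mot m i)) = false := by
          simp; omega
        rw [this]
      · have heq : pvMinE chaine mot m l (pvErrB chaine mot m i) = pvErrB chaine mot m i := le_antisymm hle (not_lt.mp hlt)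
        rw [if_neg hlt, heq, if_pos hi, List.find?_cons]
        simp
    · rw [if_neg hi, ih, pvMinE_cons, min_eq_left (not_lt.mp hi)]
      by_cases hlt : pvMinE chaine mot m l be < be
      · rw [if_pos hlt, if_pos hlt, List.find?_cons]
        have : (pvErrB chaine mot m i == pvMinE chaine mot m l be) = false := by
          rw [beq_eq_false_iff_ne]
          omega
        rw [this]
      · rw [if_neg hlt, if_neg hlt]

-- A's k-loop over a contiguous range starting at 0 ≤ lo ≤ running min
theorem pvKGo_range (chaine mot : String) (m : Int) (hm : m = (mot.toList.length : Int))
    (pos : List Int) (hpos : pos = PySem.List.pyRange 0 ((chaine.toList.length : Int) - m + 1) 1)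
    (fuel : Nat) : ∀ (lo : Int), (m - lo).toNat ≤ fuel → 0 ≤ lo →
    lo ≤ pvMinE chaine mot m pos m →
    pvKGo chaine mot (PySem.List.pyRange lo m 1) =
      (if pvMinE chaine mot m pos m < m
       then pos.find? (fun i => pvErrB chaine mot m i == pvMinE chaine mot m pos m)
       else none) := by
  induction fuel with
  | zero =>
    intro lo hf hlo hle
    have hml : m ≤ lo := by omega
    rw [PySem.List.pyRange_one_eq_nil hml, pvKGo]
    have : ¬ pvMinE chaine mot m pos m < m := by omega
    rw [if_neg this]
  | succ fuel ih =>
    intro lo hf hlo hle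
    by_cases hml : m ≤ lo
    · rw [PySem.List.pyRange_one_eq_nil hml, pvKGo]
      have : ¬ pvMinE chaine mot m pos m < m := by omega
      rw [if_neg this]
    · rw [not_le] at hml
      rw [PySem.List.pyRange_one_cons hml, pvKGo]
      rw [premiere_occurence_k_erreur, ← hm, ← hpos, pvPremGo_eq chaine mot lo hlo, ← hm]
      by_cases hstop : lo = pvMinE chaine mot m pos m
      · -- at k = minE the scan finds the leftmost minimum
        have hfind : pos.find? (fun i => decide (pvErrB chaine mot m i ≤ lo)) =
            pos.find? (fun i => pvErrB chaine mot m i == pvMinE chaine mot m pos m) := by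
          apply pvFind?_congr
          intro i hi
          have h1 := pvMinE_le_mem chaine mot m pos m i hi
          rw [← hstop]
          by_cases h : pvErrB chaine mot m i = lo
          · simp [h]
          · simp [h, show ¬ pvErrB chaine mot m i ≤ lo by omega]
        rw [hfind]
        have hlt : pvMinE chaine mot m pos m < m := by omega
        rcases pvMinE_attained chaine mot m pos m with hA | ⟨i, hi, he⟩
        · omega
        · have : ∃ x, x ∈ pos ∧ (pvErrB chaine mot m x == pvMinE chaine mot m pos m) = true :=
            ⟨i, hi, by simp [he]⟩
          rw [← List.find?_isSome] at this
          rcases Option.isSome_iff_exists.mp this with ⟨x, hx⟩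
          rw [hx, if_pos hlt]
      · -- lo < minE: the scan at threshold lo finds nothing
        have hnone : pos.find? (fun i => decide (pvErrB chaine mot m i ≤ lo)) = none := by
          apply List.find?_eq_none.mpr
          intro i hi
          have h1 := pvMinE_le_mem chaine mot m pos m i hi
          simp only [decide_eq_true_eq]
          omega
        rw [hnone]
        exact ih (lo + 1) (by omega) (by omega) (by omega)

-- ===== VERDICT (by name: the statement is the Claim_ definition above) =====
theorem occurence_avec_moins_erreurs_spec : Claim_equal_occurence_avec_moins_erreurs := by
  intro chaine mot _
  unfold Spec_occurence_avec_moins_erreurs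
  set m : Int := (mot.toList.length : Int) with hm
  set pos : List Int := PySem.List.pyRange 0 ((chaine.toList.length : Int) - m + 1) 1 with hpos
  have hm0 : 0 ≤ m := by positivity
  have hmin0 : 0 ≤ pvMinE chaine mot m pos m := pvMinE_nonneg _ _ _ _ _ hm0
  rw [occurence_avec_moins_erreurs, occurence_avec_moins_erreurs_alt]
  simp only [← hm, ← hpos]
  rw [pvBGo_eq,
    pvKGo_range chaine mot m hm pos hpos m.toNat 0 (by omega) le_rfl hmin0]
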